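-- pv_equiv track=rewrite | github.com/Petroniuss/Text-Algorithms | lab6/kmr.py | sort_rename
-- ===== SOURCE A (Python) =====
-- def sort_rename(sequence, seq_of_chars=False):
--     """
--         It uses radix sort for tuples.
--     """
--     last_entry = None
--     index = 0
--     position_to_index = [None] * len(sequence)
--     first_entry = {}
--
--     sorted_entries = None
--     if seq_of_chars:
--         sorted_entries = sorted([(e, i) for i, e in enumerate(sequence)])
--     else:
--         to_sort = [(e1, e2, i) for i, (e1, e2) in enumerate(sequence)]
--         sorted_entries = radix_sort(to_sort, 3)
--         sorted_entries = [((e1, e2), i) for (e1, e2, i) in sorted_entries]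
--
--     for entry in sorted_entries:
--         if (last_entry and last_entry[0] != entry[0]):
--             index += 1
--             first_entry[index] = entry[1]
--         elif last_entry is None:
--             first_entry[0] = entry[1]
--
--         position_to_index[entry[1]] = index
--         last_entry = entry
--
--     return (position_to_index, first_entry)
--
-- def radix_sort(seq, tuple_len):
--     """
--         Radix sort for sequences of tuples with fixed len.
--     """
--     for k in range(tuple_len - 1, -1, -1):
--         seq = counting_sort(seq, k)
--
--     return seq
--
-- def counting_sort(seq, k):
--     """
--         Counting sort for tuples with values less than n = len(seq).
--
--         k - sort with regard to k-th element.
--     """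
--     n = len(seq)
--     output = [None] * n
--     count = [0] * n
--
--     for i in range(n):
--         count[seq[i][k]] += 1
--
--     for i in range(1, n):
--         count[i] += count[i - 1]
--
--     for i in range(n - 1, -1, -1):
--         output[count[seq[i][k]] - 1] = seq[i]
--         count[seq[i][k]] -= 1
--
--     return output
-- ===== SOURCE B (Python) =====
-- def sort_rename(sequence, seq_of_chars=False):
--     """Rank entries by sorted order (KMR rename) via one library sort pass."""
--     n = len(sequence)
--     position_to_index = [None] * n
--     first_entry = {}
--     index = -1
--     prev = None
--     for e, i in sorted((sequence[i], i) for i in range(n)):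
--         if prev != e:
--             index += 1
--             first_entry[index] = i
--         position_to_index[i] = index
--         prev = e
--     return (position_to_index, first_entry)
-- ===== Notes on version B (the rewrite author's own statement) =====
-- stated objective: simpler
-- what changed: Replaces the hand-written radix/counting-sort machinery and the two-branch tuple reshaping with one library sort of (entry, index) pairs followed by the single rename pass; Pre_ excludes radix-branch inputs whose components are not valid counting-sort keys (at least n or below -n raises IndexError; negative ones silently wrap around count).
-- outside the precondition, e.g. on sort_rename([(-1, 0), (0, 0)], False): A returns ([1, 0], {0: 1, 1: 0}), B returns ([0, 1], {0: 0, 1: 1})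
import Mathlib
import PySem

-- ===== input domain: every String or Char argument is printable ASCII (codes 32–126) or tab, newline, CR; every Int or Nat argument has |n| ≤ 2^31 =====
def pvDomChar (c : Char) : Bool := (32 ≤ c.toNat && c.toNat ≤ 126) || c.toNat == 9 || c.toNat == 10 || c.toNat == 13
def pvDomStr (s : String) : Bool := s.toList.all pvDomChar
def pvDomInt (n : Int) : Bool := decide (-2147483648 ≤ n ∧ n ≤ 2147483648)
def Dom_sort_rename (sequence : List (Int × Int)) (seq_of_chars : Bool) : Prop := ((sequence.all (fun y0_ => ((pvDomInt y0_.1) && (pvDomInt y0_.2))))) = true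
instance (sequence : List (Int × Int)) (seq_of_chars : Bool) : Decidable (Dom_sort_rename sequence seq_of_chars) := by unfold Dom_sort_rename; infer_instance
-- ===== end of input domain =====

-- B replaces A's hand-written radix/counting-sort machinery by one library argsort plus the same
-- single rename pass (objective: simpler); equivalence is proved on inputs where the counting sort's
-- indices stay in range (Pre_ below).

-- ===== PORT A =====

-- shared helper: Python list assignment 'c[v] = x'; exact for 0 ≤ v < len(c), the only indices the
-- admitted inputs reach
def lset {α : Type} (c : List α) (v : Int) (x : α) : List α :=
  if 0 ≤ v ∧ v.toNat < c.length then c.set v.toNat x else c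

-- 'seq[i][k]' for a 3-tuple, k ∈ {0, 1, 2}
def tget (t : Int × Int × Int) (k : Int) : Int :=
  if k = 0 then t.1 else if k = 1 then t.2.1 else t.2.2

-- sort key for Python's lexicographic comparison of ((e1, e2), i) tuples (exact: Python tuple
-- comparison is lexicographic, modelled with ×ₗ)
def keyP (p : (Int × Int) × Int) : Lex (Lex (Int × Int) × Int) := toLex (toLex p.1, p.2)

def counting_sort (seq : List (Int × Int × Int)) (k : Int) : List (Int × Int × Int) :=
  let n : Int := (seq.length : Int)
  -- output = [None] * n : placeholder entries; on admitted inputs every slot is overwritten (exact there)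
  let output : List (Int × Int × Int) := List.replicate seq.length (0, 0, 0)
  let count : List Int := List.replicate seq.length 0
  let count := (PySem.List.pyRange 0 n 1).foldl (fun c i =>
      lset c (tget (PySem.List.pyGetD seq i (0, 0, 0)) k)
             (PySem.List.pyGetD c (tget (PySem.List.pyGetD seq i (0, 0, 0)) k) 0 + 1)) count
  let count := (PySem.List.pyRange 1 n 1).foldl (fun c i =>
      lset c i (PySem.List.pyGetD c i 0 + PySem.List.pyGetD c (i - 1) 0)) count
  let oc := (PySem.List.pyRange (n - 1) (-1) (-1)).foldl
      (fun (oc : List (Int × Int × Int) × List Int) i =>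
        let t := PySem.List.pyGetD seq i (0, 0, 0)
        let v := tget t k
        (lset oc.1 (PySem.List.pyGetD oc.2 v 0 - 1) t, lset oc.2 v (PySem.List.pyGetD oc.2 v 0 - 1)))
      (output, count)
  oc.1

def radix_sort (seq : List (Int × Int × Int)) (tuple_len : Int) : List (Int × Int × Int) :=
  (PySem.List.pyRange (tuple_len - 1) (-1) (-1)).foldl (fun s k => counting_sort s k) seq

-- the body of A's rename loop ('for entry in sorted_entries: ...')
def renameStepA (st : Option ((Int × Int) × Int) × Int × PySem.Dict Int Int × List (Option Int))
    (entry : (Int × Int) × Int) :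
    Option ((Int × Int) × Int) × Int × PySem.Dict Int Int × List (Option Int) :=
  match st.1 with
  | some le =>
    if le.1 ≠ entry.1 then
      (some entry, st.2.1 + 1, (st.2.2.1).insert (st.2.1 + 1) entry.2,
        lset st.2.2.2 entry.2 (some (st.2.1 + 1)))
    else
      (some entry, st.2.1, st.2.2.1, lset st.2.2.2 entry.2 (some st.2.1))
  | none =>
    (some entry, st.2.1, (st.2.2.1).insert 0 entry.2, lset st.2.2.2 entry.2 (some st.2.1))

def sort_rename (sequence : List (Int × Int)) (seq_of_chars : Bool) :
    List (Option Int) × (List (Int × Int)) :=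
  let position_to_index : List (Option Int) := List.replicate sequence.length none
  let sorted_entries : List ((Int × Int) × Int) :=
    if seq_of_chars then
      PySem.List.sorted ((PySem.List.enumerate sequence).map (fun p => (p.2, p.1))) keyP false
    else
      let to_sort := (PySem.List.enumerate sequence).map (fun p => (p.2.1, p.2.2, p.1))
      (radix_sort to_sort 3).map (fun t => ((t.1, t.2.1), t.2.2))
  let st := sorted_entries.foldl renameStepA (none, 0, PySem.Dict.empty, position_to_index)
  (st.2.2.2, (st.2.2.1).items)

-- ===== PORT B =====

-- the body of B's rename loop ('for e, i in sorted(...): ...')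
def renameStepB (st : Int × Option (Int × Int) × PySem.Dict Int Int × List (Option Int))
    (p : (Int × Int) × Int) :
    Int × Option (Int × Int) × PySem.Dict Int Int × List (Option Int) :=
  if st.2.1 ≠ some p.1 then
    (st.1 + 1, some p.1, (st.2.2.1).insert (st.1 + 1) p.2, lset st.2.2.2 p.2 (some (st.1 + 1)))
  else
    (st.1, some p.1, st.2.2.1, lset st.2.2.2 p.2 (some st.1))

def sort_rename_alt (sequence : List (Int × Int)) (seq_of_chars : Bool) :
    List (Option Int) × (List (Int × Int)) :=
  let n : Int := (sequence.length : Int)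
  let position_to_index : List (Option Int) := List.replicate sequence.length none
  -- sorted((sequence[i], i) for i in range(n)); Python's lexicographic tuple comparison is the keyP (×ₗ) key — exact
  let st := (PySem.List.sorted ((PySem.List.pyRange 0 n 1).map
        (fun i => (PySem.List.pyGetD sequence i (0, 0), i))) keyP false).foldl
      renameStepB (-1, none, PySem.Dict.empty, position_to_index)
  (st.2.2.2, (st.2.2.1).items)

-- ===== PRECONDITION & SPEC =====

-- Pre_ excludes, for the radix branch only, sequences with an entry component that is not a valid
-- counting-sort key (0 ≤ component < n): a component ≥ n or < -n makes A's counting sort raise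
-- IndexError, and a negative component ≥ -n makes its count indexing wrap around (Python negative
-- indexing) — an accidental order outside the counting sort's documented 'values less than n'
-- domain (see cites in claim.json).
def Pre_sort_rename (sequence : List (Int × Int)) (seq_of_chars : Bool) : Prop :=
  seq_of_chars = true ∨
    ∀ e ∈ sequence, 0 ≤ e.1 ∧ e.1 < sequence.length ∧ 0 ≤ e.2 ∧ e.2 < sequence.length

instance (sequence : List (Int × Int)) (seq_of_chars : Bool) :
    Decidable (Pre_sort_rename sequence seq_of_chars) := by unfold Pre_sort_rename; infer_instance

def pvWitness_sort_rename : (List (Int × Int)) × Bool := ([(1, 0), (0, 1)], false)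

def Spec_sort_rename (sequence : List (Int × Int)) (seq_of_chars : Bool)
    (out : List (Option Int) × (List (Int × Int))) : Prop :=
  out = sort_rename_alt sequence seq_of_chars

instance (sequence : List (Int × Int)) (seq_of_chars : Bool)
    (out : List (Option Int) × (List (Int × Int))) :
    Decidable (Spec_sort_rename sequence seq_of_chars out) := by
  unfold Spec_sort_rename; infer_instance

-- ===== CLAIM (what is proved, stated in full; the proofs are below) =====
def Claim_equal_sort_rename : Prop := ∀ (sequence : List (Int × Int)) (seq_of_chars : Bool), Dom_sort_rename sequence seq_of_chars → Pre_sort_rename sequence seq_of_chars → Spec_sort_rename sequence seq_of_chars (sort_rename sequence seq_of_chars)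

-- ===== LEMMAS AND PROOFS =====

-- position-indexed key of a list of triples
def keyAt (L : List (Int × Int × Int)) (k : Int) (j : Nat) : Int := tget (L.getD j (0, 0, 0)) k

-- #{j < |L| : keyAt j = v} and #{j < |L| : keyAt j ≤ v}
def cntEq (L : List (Int × Int × Int)) (k : Int) (v : Int) : Nat :=
  (List.range L.length).countP (fun j => decide (keyAt L k j = v))
def cntLe (L : List (Int × Int × Int)) (k : Int) (v : Int) : Nat :=
  (List.range L.length).countP (fun j => decide (keyAt L k j ≤ v))
-- #{j' < |L| : j < j' and keyAt j' = keyAt j}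
def gtc (L : List (Int × Int × Int)) (k : Int) (j : Nat) : Nat :=
  (List.range L.length).countP (fun j' => decide (j < j' ∧ keyAt L k j' = keyAt L k j))
-- #{j' < |L| : m ≤ j' and keyAt j' = v}
def suff (L : List (Int × Int × Int)) (k : Int) (m : Nat) (v : Int) : Nat :=
  (List.range L.length).countP (fun j => decide (m ≤ j ∧ keyAt L k j = v))
-- the position at which the placement loop writes the element of position j
def posOf (L : List (Int × Int × Int)) (k : Int) (j : Nat) : Int :=
  (cntLe L k (keyAt L k j) : Int) - 1 - (gtc L k j : Int)
-- the stable argsort of L by (key, position)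
def idxSorted (L : List (Int × Int × Int)) (k : Int) : List Nat :=
  PySem.List.sorted (List.range L.length) (fun j => toLex (keyAt L k j, (j : Int))) false

theorem length_lset {α : Type} (c : List α) (v : Int) (x : α) :
    (lset c v x).length = c.length := by
  unfold lset; split <;> simp

theorem lget_lset {α : Type} (c : List α) (v w : Int) (x d : α)
    (h0 : 0 ≤ w) (hw : w < (c.length : Int)) (hv : 0 ≤ v) :
    PySem.List.pyGetD (lset c w x) v d = if v = w then x else PySem.List.pyGetD c v d := by
  unfold lset
  rw [if_pos ⟨h0, by omega⟩]
  rw [PySem.List.pyGetD_of_nonneg _ _ hv, PySem.List.pyGetD_of_nonneg _ _ hv]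
  rw [List.getD_eq_getElem?_getD, List.getD_eq_getElem?_getD, List.getElem?_set]
  by_cases h : v = w
  · subst h
    rw [if_pos (by omega : v.toNat < c.length)]
    simp
  · rw [if_neg (by omega), if_neg h]

theorem countP_or_disjoint {α : Type} (l : List α) (p q r : α → Bool)
    (h : ∀ x ∈ l, p x = (q x || r x)) (hd : ∀ x ∈ l, ¬(q x = true ∧ r x = true)) :
    l.countP p = l.countP q + l.countP r := by
  induction l with
  | nil => simp
  | cons y t ih =>
    have hy := h y (by simp)
    have hdy := hd y (by simp)
    have ht := ih (fun x hx => h x (by simp [hx])) (fun x hx => hd x (by simp [hx]))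
    by_cases hq : q y = true
    · have hr : r y = false := by
        cases hr : r y
        · rfl
        · exact absurd ⟨hq, hr⟩ hdy
      rw [List.countP_cons_of_pos (by rw [hy]; simp [hq]),
        List.countP_cons_of_pos hq, List.countP_cons_of_neg (by simp [hr]), ht]
      omega
    · by_cases hr : r y = true
      · rw [List.countP_cons_of_pos (by rw [hy]; simp [hr]),
          List.countP_cons_of_pos hr, List.countP_cons_of_neg hq, ht]
        omega
      · rw [List.countP_cons_of_neg (by rw [hy]; simp only [Bool.or_eq_true]; tauto),
          List.countP_cons_of_neg hq, List.countP_cons_of_neg hr, ht]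

theorem countP_lt_countP {α : Type} (l : List α) (p q : α → Bool)
    (himp : ∀ x ∈ l, p x = true → q x = true)
    (x0 : α) (hx0 : x0 ∈ l) (hq0 : q x0 = true) (hp0 : ¬ p x0 = true) :
    l.countP p < l.countP q := by
  induction l with
  | nil => simp at hx0
  | cons y t ih =>
    by_cases hy : q y = true ∧ ¬ p y = true
    · have h1 : t.countP p ≤ t.countP q :=
        List.countP_mono_left (fun x hx => himp x (by simp [hx]))
      rw [List.countP_cons_of_neg hy.2, List.countP_cons_of_pos hy.1]
      omega
    · have hx0t : x0 ∈ t := by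
        rcases List.mem_cons.mp hx0 with h | h
        · exact absurd ⟨hq0, hp0⟩ (h ▸ hy)
        · exact h
      have := ih (fun x hx h => himp x (by simp [hx]) h) hx0t
      by_cases hp : p y = true
      · rw [List.countP_cons_of_pos hp, List.countP_cons_of_pos (himp y (by simp) hp)]
        omega
      · rw [List.countP_cons_of_neg hp, List.countP_cons]
        split <;> omega

theorem countP_add_lt_countP {α : Type} (l : List α) (p q r : α → Bool)
    (hq : ∀ x ∈ l, q x = true → p x = true) (hr : ∀ x ∈ l, r x = true → p x = true)
    (hd : ∀ x ∈ l, ¬(q x = true ∧ r x = true))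
    (x0 : α) (hx0 : x0 ∈ l) (hp0 : p x0 = true) (hnq : ¬ q x0 = true) (hnr : ¬ r x0 = true) :
    l.countP q + l.countP r < l.countP p := by
  have h1 : l.countP (fun x => q x || r x) = l.countP q + l.countP r :=
    countP_or_disjoint l _ q r (fun _ _ => rfl) hd
  rw [← h1]
  exact countP_lt_countP l _ p
    (fun x hx h => by
      rcases Bool.or_eq_true_iff.mp h with h | h
      exacts [hq x hx h, hr x hx h])
    x0 hx0 hp0 (by simp [hnq, hnr])

theorem keyAt_bounds (L : List (Int × Int × Int)) (k : Int)
    (h : ∀ t ∈ L, 0 ≤ tget t k ∧ tget t k < (L.length : Int)) :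
    ∀ j, j < L.length → 0 ≤ keyAt L k j ∧ keyAt L k j < (L.length : Int) := by
  intro j hj
  have hmem : L.getD j (0, 0, 0) ∈ L := by
    rw [List.getD_eq_getElem L _ hj]
    exact List.getElem_mem hj
  exact h _ hmem

theorem posOf_bounds (L : List (Int × Int × Int)) (k : Int)
    (hkey : ∀ j, j < L.length → 0 ≤ keyAt L k j ∧ keyAt L k j < (L.length : Int))
    (j : Nat) (hj : j < L.length) :
    0 ≤ posOf L k j ∧ posOf L k j < (L.length : Int) := by
  have h1 : gtc L k j < cntEq L k (keyAt L k j) := by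
    apply countP_lt_countP _ _ _
      (fun x _ h => by
        simp only [decide_eq_true_eq] at h ⊢
        exact h.2) j (List.mem_range.mpr hj)
    · simp
    · simp
  have h2 : cntEq L k (keyAt L k j) ≤ cntLe L k (keyAt L k j) := by
    apply List.countP_mono_left
    intro x _ h
    simp only [decide_eq_true_eq] at h ⊢
    omega
  have h3 : cntLe L k (keyAt L k j) ≤ L.length := by
    unfold cntLe
    calc List.countP _ (List.range L.length) ≤ (List.range L.length).length :=
          List.countP_le_length
      _ = L.length := List.length_range
  unfold posOf
  omega

theorem posOf_lt_of_eq (L : List (Int × Int × Int)) (k : Int) (j j' : Nat)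
    (hj : j < L.length) (hj' : j' < L.length)
    (hlt : j < j') (hkeq : keyAt L k j = keyAt L k j') :
    posOf L k j < posOf L k j' := by
  have h1 : gtc L k j' < gtc L k j := by
    apply countP_lt_countP _ _ _
      (fun x _ h => by
        simp only [decide_eq_true_eq] at h ⊢
        exact ⟨by omega, by rw [h.2, ← hkeq]⟩) j' (List.mem_range.mpr hj')
    · simp only [decide_eq_true_eq]
      exact ⟨hlt, hkeq.symm⟩
    · simp only [decide_eq_true_eq]
      omega
  unfold posOf
  rw [hkeq]
  omega

theorem posOf_lt_of_key_lt (L : List (Int × Int × Int)) (k : Int) (j j' : Nat)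
    (hj' : j' < L.length) (hklt : keyAt L k j < keyAt L k j') :
    posOf L k j < posOf L k j' := by
  have h1 : cntLe L k (keyAt L k j) + gtc L k j' < cntLe L k (keyAt L k j') := by
    apply countP_add_lt_countP _ _ _ _
      (fun x _ h => by simp only [decide_eq_true_eq] at h ⊢; omega)
      (fun x _ h => by simp only [decide_eq_true_eq] at h ⊢; omega)
      (fun x _ h => by simp only [decide_eq_true_eq] at h; omega)
      j' (List.mem_range.mpr hj')
    · simp only [decide_eq_true_eq]
      exact le_refl _
    · simp only [decide_eq_true_eq]
      omega
    · simp only [decide_eq_true_eq]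
      omega
  have h2 : 0 ≤ (gtc L k j : Int) := by positivity
  unfold posOf
  omega

theorem posOf_ne (L : List (Int × Int × Int)) (k : Int) (j j' : Nat)
    (hj : j < L.length) (hj' : j' < L.length) (hne : j ≠ j') :
    posOf L k j ≠ posOf L k j' := by
  rcases lt_trichotomy (keyAt L k j) (keyAt L k j') with h | h | h
  · exact ne_of_lt (posOf_lt_of_key_lt L k j j' hj' h)
  · rcases Nat.lt_or_ge j j' with hlt | hge
    · exact ne_of_lt (posOf_lt_of_eq L k j j' hj hj' hlt h)
    · exact (ne_of_lt (posOf_lt_of_eq L k j' j hj' hj (by omega) h.symm)).symm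
  · exact (ne_of_lt (posOf_lt_of_key_lt L k j' j hj h)).symm

-- the three loop bodies of counting_sort, named for the proofs (definitionally the port's lambdas)
def histStep (L : List (Int × Int × Int)) (k : Int) (c : List Int) (i : Int) : List Int :=
  lset c (tget (PySem.List.pyGetD L i (0, 0, 0)) k)
    (PySem.List.pyGetD c (tget (PySem.List.pyGetD L i (0, 0, 0)) k) 0 + 1)
def preStep (c : List Int) (i : Int) : List Int :=
  lset c i (PySem.List.pyGetD c i 0 + PySem.List.pyGetD c (i - 1) 0)
def placeStep (L : List (Int × Int × Int)) (k : Int)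
    (oc : List (Int × Int × Int) × List Int) (i : Int) : List (Int × Int × Int) × List Int :=
  let t := PySem.List.pyGetD L i (0, 0, 0)
  let v := tget t k
  (lset oc.1 (PySem.List.pyGetD oc.2 v 0 - 1) t, lset oc.2 v (PySem.List.pyGetD oc.2 v 0 - 1))

theorem cntEq_out (L : List (Int × Int × Int)) (k : Int)
    (hkey : ∀ j, j < L.length → 0 ≤ keyAt L k j ∧ keyAt L k j < (L.length : Int))
    (v : Int) (hv : ¬(0 ≤ v ∧ v < (L.length : Int))) : cntEq L k v = 0 := by
  apply List.countP_eq_zero.mpr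
  intro j hj
  have := hkey j (List.mem_range.mp hj)
  simp only [decide_eq_true_eq]
  omega

theorem cntLe_neg (L : List (Int × Int × Int)) (k : Int)
    (hkey : ∀ j, j < L.length → 0 ≤ keyAt L k j ∧ keyAt L k j < (L.length : Int))
    (v : Int) (hv : v < 0) : cntLe L k v = 0 := by
  apply List.countP_eq_zero.mpr
  intro j hj
  have := hkey j (List.mem_range.mp hj)
  simp only [decide_eq_true_eq]
  omega

theorem cntLe_split (L : List (Int × Int × Int)) (k : Int) (v : Int) :
    cntLe L k v = cntLe L k (v - 1) + cntEq L k v := by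
  refine countP_or_disjoint _ _ _ _ (fun x _ => ?_) (fun x _ h => ?_)
  · rw [← Bool.decide_or]
    exact decide_eq_decide.mpr (by omega)
  · simp only [decide_eq_true_eq] at h
    omega

theorem countP_range_singleton (n m : Nat) (h : m < n) :
    (List.range n).countP (fun j => decide (j = m)) = 1 := by
  have he : (fun j : Nat => decide (j = m)) = (fun j : Nat => j == m) := by
    funext j
    exact (Bool.beq_eq_decide_eq j m).symm
  rw [he]
  exact List.count_eq_one_of_mem List.nodup_range (List.mem_range.mpr h)

theorem gtc_eq_suff (L : List (Int × Int × Int)) (k : Int) (m : Nat) :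
    gtc L k m = suff L k (m + 1) (keyAt L k m) := by
  refine List.countP_congr (fun x _ => ?_)
  simp only [decide_eq_true_eq]
  omega

theorem suff_top (L : List (Int × Int × Int)) (k : Int) (v : Int) : suff L k L.length v = 0 := by
  apply List.countP_eq_zero.mpr
  intro j hj
  have := List.mem_range.mp hj
  simp only [decide_eq_true_eq]
  omega

theorem suff_succ (L : List (Int × Int × Int)) (k : Int) (m : Nat) (hm : m < L.length) (v : Int) :
    suff L k m v = suff L k (m + 1) v + (if keyAt L k m = v then 1 else 0) := by
  by_cases hkv : keyAt L k m = v
  · rw [if_pos hkv]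
    have h1 : suff L k m v =
        suff L k (m + 1) v + (List.range L.length).countP (fun j => decide (j = m)) := by
      refine countP_or_disjoint _ _ _ _ (fun x _ => ?_) (fun x _ h => ?_)
      · rw [← Bool.decide_or]
        refine decide_eq_decide.mpr ?_
        constructor
        · rintro ⟨h1, h2⟩
          rcases Nat.lt_or_ge m x with h3 | h3
          · exact Or.inl ⟨by omega, h2⟩
          · exact Or.inr (by omega)
        · rintro (⟨h1, h2⟩ | rfl)
          · exact ⟨by omega, h2⟩
          · exact ⟨le_rfl, hkv⟩
      · simp only [decide_eq_true_eq] at h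
        omega
    rw [h1, countP_range_singleton _ _ hm]
  · rw [if_neg hkv, Nat.add_zero]
    refine List.countP_congr (fun x _ => ?_)
    simp only [decide_eq_true_eq]
    constructor
    · rintro ⟨h1, h2⟩
      refine ⟨?_, h2⟩
      rcases Nat.eq_or_lt_of_le h1 with rfl | h3
      · exact absurd h2 hkv
      · omega
    · rintro ⟨h1, h2⟩
      exact ⟨by omega, h2⟩

theorem pyRange_neg_one_snoc (a b : Int) (h : b < a) :
    PySem.List.pyRange a b (-1) = PySem.List.pyRange a (b + 1) (-1) ++ [b + 1] := by
  rw [PySem.List.pyRange_neg_one_eq_reverse, PySem.List.pyRange_one_cons (by omega : b + 1 < a + 1),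
    List.reverse_cons, PySem.List.pyRange_neg_one_eq_reverse]

theorem hist_fold (L : List (Int × Int × Int)) (k : Int) (js : List Int) (c : List Int)
    (hlen : c.length = L.length)
    (hj : ∀ j ∈ js, 0 ≤ j ∧ j < (L.length : Int))
    (hkey : ∀ j, j < L.length → 0 ≤ keyAt L k j ∧ keyAt L k j < (L.length : Int)) :
    (js.foldl (histStep L k) c).length = L.length ∧
    ∀ v : Int, 0 ≤ v →
      PySem.List.pyGetD (js.foldl (histStep L k) c) v 0 =
        PySem.List.pyGetD c v 0 + (js.countP (fun j => decide (keyAt L k j.toNat = v)) : Int) := by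
  induction js generalizing c with
  | nil => simp [hlen]
  | cons i t ih =>
    obtain ⟨hi0, hin⟩ := hj i (List.mem_cons_self ..)
    have hkeyi : tget (PySem.List.pyGetD L i (0, 0, 0)) k = keyAt L k i.toNat := by
      rw [PySem.List.pyGetD_of_nonneg _ _ hi0]
      rfl
    have hwb := hkey i.toNat (by omega)
    have hstep : histStep L k c i =
        lset c (keyAt L k i.toNat) (PySem.List.pyGetD c (keyAt L k i.toNat) 0 + 1) := by
      rw [histStep, hkeyi]
    have hlen' : (histStep L k c i).length = L.length := by
      rw [hstep, length_lset]
      exact hlen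
    obtain ⟨ihl, ihv⟩ := ih (histStep L k c i) hlen' (fun j hj' => hj j (List.mem_cons_of_mem _ hj'))
    refine ⟨by simpa using ihl, fun v hv => ?_⟩
    rw [List.foldl_cons, ihv v hv, List.countP_cons]
    have hrd : PySem.List.pyGetD (histStep L k c i) v 0 =
        if v = keyAt L k i.toNat then PySem.List.pyGetD c (keyAt L k i.toNat) 0 + 1
        else PySem.List.pyGetD c v 0 := by
      rw [hstep]
      exact lget_lset c v _ _ 0 hwb.1 (by omega) hv
    rw [hrd]
    by_cases hveq : v = keyAt L k i.toNat
    · rw [if_pos hveq, if_pos (by simp [hveq])]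
      push_cast
      rw [hveq]
      ring
    · rw [if_neg hveq, if_neg (by simpa using fun h => hveq h.symm)]
      push_cast
      ring

theorem pre_fold (L : List (Int × Int × Int)) (k : Int)
    (hkey : ∀ j, j < L.length → 0 ≤ keyAt L k j ∧ keyAt L k j < (L.length : Int))
    (c : List Int) (hlen : c.length = L.length)
    (hc : ∀ v : Int, 0 ≤ v → PySem.List.pyGetD c v 0 = (cntEq L k v : Int)) :
    ∀ m : Nat, m ≤ L.length →
      ((PySem.List.pyRange 1 (m : Int) 1).foldl preStep c).length = L.length ∧
      ∀ v : Int, 0 ≤ v →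
        PySem.List.pyGetD ((PySem.List.pyRange 1 (m : Int) 1).foldl preStep c) v 0 =
          if v < (m : Int) then (cntLe L k v : Int) else (cntEq L k v : Int) := by
  have hle0 : ∀ v : Int, 0 ≤ v → v < 1 → (cntLe L k v : Int) = (cntEq L k v : Int) := by
    intro v h0 h1
    have hv0 : v = 0 := by omega
    subst hv0
    rw [cntLe_split L k 0, cntLe_neg L k hkey (0 - 1) (by omega)]
    push_cast
    ring
  intro m
  induction m with
  | zero =>
    intro _
    rw [PySem.List.pyRange_one_eq_nil (by norm_num)]
    refine ⟨by simpa using hlen, fun v hv => ?_⟩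
    rw [List.foldl_nil, hc v hv, if_neg (by omega)]
  | succ m ih =>
    intro hm
    by_cases hm0 : m = 0
    · subst hm0
      rw [show (((0 + 1 : Nat)) : Int) = 1 by norm_num, PySem.List.pyRange_one_eq_nil le_rfl]
      refine ⟨by simpa using hlen, fun v hv => ?_⟩
      rw [List.foldl_nil, hc v hv]
      split
      · exact (hle0 v hv (by omega)).symm
      · rfl
    · obtain ⟨ihl, ihv⟩ := ih (by omega)
      have hsplit : PySem.List.pyRange 1 ((m : Nat) + 1 : Int) 1 =
          PySem.List.pyRange 1 (m : Int) 1 ++ [(m : Int)] :=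
        PySem.List.pyRange_one_succ_right (by omega)
      rw [show (((m + 1 : Nat)) : Int) = ((m : Nat) + 1 : Int) by push_cast; ring, hsplit,
        List.foldl_append, List.foldl_cons, List.foldl_nil]
      set c' := (PySem.List.pyRange 1 (m : Int) 1).foldl preStep c with hc'
      have hrdm : PySem.List.pyGetD c' (m : Int) 0 = (cntEq L k (m : Int) : Int) := by
        rw [ihv (m : Int) (by positivity), if_neg (by omega)]
      have hrdm1 : PySem.List.pyGetD c' ((m : Int) - 1) 0 = (cntLe L k ((m : Int) - 1) : Int) := by
        rw [ihv ((m : Int) - 1) (by omega), if_pos (by omega)]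
      have hstep : preStep c' (m : Int) =
          lset c' (m : Int) ((cntEq L k (m : Int) : Int) + (cntLe L k ((m : Int) - 1) : Int)) := by
        rw [preStep, hrdm, hrdm1]
      refine ⟨by rw [hstep, length_lset]; exact ihl, fun v hv => ?_⟩
      have hrd : PySem.List.pyGetD (preStep c' (m : Int)) v 0 =
          if v = (m : Int) then (cntEq L k (m : Int) : Int) + (cntLe L k ((m : Int) - 1) : Int)
          else PySem.List.pyGetD c' v 0 := by
        rw [hstep]
        exact lget_lset c' v _ _ 0 (by positivity) (by rw [ihl]; exact_mod_cast by omega) hv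
      rw [hrd]
      by_cases hveq : v = (m : Int)
      · rw [if_pos hveq, if_pos (by omega), hveq]
        rw [cntLe_split L k (m : Int)]
        push_cast
        ring
      · rw [if_neg hveq, ihv v hv]
        by_cases hvm : v < (m : Int)
        · rw [if_pos hvm, if_pos (by omega)]
        · rw [if_neg hvm, if_neg (by omega)]

theorem place_fold (L : List (Int × Int × Int)) (k : Int)
    (hkey : ∀ j, j < L.length → 0 ≤ keyAt L k j ∧ keyAt L k j < (L.length : Int))
    (o : List (Int × Int × Int)) (c : List Int)
    (holen : o.length = L.length) (hclen : c.length = L.length)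
    (hc : ∀ v : Int, 0 ≤ v →
      PySem.List.pyGetD c v 0 = if v < (L.length : Int) then (cntLe L k v : Int) else 0) :
    ∀ (d m : Nat), m + d = L.length →
      (((PySem.List.pyRange ((L.length : Int) - 1) ((m : Int) - 1) (-1)).foldl
          (placeStep L k) (o, c)).1.length = L.length ∧
       ((PySem.List.pyRange ((L.length : Int) - 1) ((m : Int) - 1) (-1)).foldl
          (placeStep L k) (o, c)).2.length = L.length) ∧
      (∀ v : Int, 0 ≤ v → v < (L.length : Int) →
        PySem.List.pyGetD ((PySem.List.pyRange ((L.length : Int) - 1) ((m : Int) - 1) (-1)).foldl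
            (placeStep L k) (o, c)).2 v 0 = (cntLe L k v : Int) - (suff L k m v : Int)) ∧
      (∀ j : Nat, m ≤ j → j < L.length →
        PySem.List.pyGetD ((PySem.List.pyRange ((L.length : Int) - 1) ((m : Int) - 1) (-1)).foldl
            (placeStep L k) (o, c)).1 (posOf L k j) (0, 0, 0) = L.getD j (0, 0, 0)) := by
  intro d
  induction d with
  | zero =>
    intro m hm
    have hmn : m = L.length := by omega
    subst hmn
    rw [PySem.List.pyRange_neg_one_eq_nil (by omega), List.foldl_nil]
    refine ⟨⟨holen, hclen⟩, fun v hv hvn => ?_, fun j hj hjn => absurd hjn (by omega)⟩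
    rw [hc v hv, if_pos hvn, suff_top]
    push_cast
    ring
  | succ d ih =>
    intro m hm
    have hmn : m < L.length := by omega
    have hcast : (((m + 1 : Nat)) : Int) - 1 = (m : Int) := by push_cast; ring
    obtain ⟨⟨ih1, ih2⟩, ihc, iho⟩ := ih (m + 1) (by omega)
    rw [hcast] at ih1 ih2 ihc iho
    have hsplit : PySem.List.pyRange ((L.length : Int) - 1) ((m : Int) - 1) (-1) =
        PySem.List.pyRange ((L.length : Int) - 1) (m : Int) (-1) ++ [(m : Int)] := by
      have := pyRange_neg_one_snoc ((L.length : Int) - 1) ((m : Int) - 1) (by omega)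
      rw [show (m : Int) - 1 + 1 = (m : Int) by ring] at this
      exact this
    rw [hsplit, List.foldl_append, List.foldl_cons, List.foldl_nil]
    set st := (PySem.List.pyRange ((L.length : Int) - 1) (m : Int) (-1)).foldl (placeStep L k) (o, c)
      with hst
    have hkm := hkey m hmn
    have ht : PySem.List.pyGetD L (m : Int) (0, 0, 0) = L.getD m (0, 0, 0) :=
      PySem.List.pyGetD_natCast L m (0, 0, 0)
    have hkmv : tget (PySem.List.pyGetD L (m : Int) (0, 0, 0)) k = keyAt L k m := by
      rw [ht]
      rfl
    have hread : PySem.List.pyGetD st.2 (keyAt L k m) 0 =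
        (cntLe L k (keyAt L k m) : Int) - (suff L k (m + 1) (keyAt L k m) : Int) :=
      ihc _ hkm.1 hkm.2
    have hposm : (cntLe L k (keyAt L k m) : Int) - (suff L k (m + 1) (keyAt L k m) : Int) - 1 =
        posOf L k m := by
      rw [posOf, gtc_eq_suff]
      ring
    have hpb := posOf_bounds L k hkey m hmn
    have hstep : placeStep L k st (m : Int) =
        (lset st.1 (posOf L k m) (L.getD m (0, 0, 0)),
         lset st.2 (keyAt L k m) ((cntLe L k (keyAt L k m) : Int) - (suff L k (m + 1) (keyAt L k m) : Int) - 1)) := by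
      rw [placeStep]
      simp only [ht]
      rw [show tget (L.getD m (0, 0, 0)) k = keyAt L k m from rfl, hread, hposm]
    rw [hstep]
    refine ⟨⟨by rw [length_lset]; exact ih1, by rw [length_lset]; exact ih2⟩,
      fun v hv hvn => ?_, fun j hj hjn => ?_⟩
    · rw [lget_lset st.2 v _ _ 0 hkm.1 (by rw [ih2]; exact hkm.2) hv]
      by_cases hveq : v = keyAt L k m
      · rw [if_pos hveq, hveq, suff_succ L k m hmn (keyAt L k m), if_pos rfl]
        push_cast
        ring
      · rw [if_neg hveq, ihc v hv hvn, suff_succ L k m hmn v,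
          if_neg (by simpa using fun h => hveq h.symm)]
        push_cast
        ring
    · rw [lget_lset st.1 _ _ _ (0, 0, 0) hpb.1 (by rw [ih1]; exact hpb.2)
        (posOf_bounds L k hkey j hjn).1]
      rcases Nat.eq_or_lt_of_le hj with rfl | hjm
      · rw [if_pos rfl]
      · rw [if_neg (posOf_ne L k j m hjn hmn (by omega))]
        exact iho j (by omega) hjn

theorem incr_getElem (l : List Int) (h : List.Pairwise (· < ·) l)
    (hb : ∀ x ∈ l, 0 ≤ x ∧ x < (l.length : Int)) :
    ∀ p (hp : p < l.length), l[p] = (p : Int) := by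
  have hget := List.pairwise_iff_getElem.mp h
  have lower : ∀ p (hp : p < l.length), (p : Int) ≤ l[p] := by
    intro p
    induction p with
    | zero =>
      intro hp
      exact_mod_cast (hb _ (l.getElem_mem hp)).1
    | succ q ihq =>
      intro hp
      have h1 := hget q (q + 1) (by omega) hp (by omega)
      have h2 := ihq (by omega)
      push_cast
      omega
  have upper : ∀ d p (hp : p < l.length), p + d + 1 = l.length → l[p] ≤ (p : Int) := by
    intro d
    induction d with
    | zero =>
      intro p hp he
      have h1 := (hb _ (l.getElem_mem hp)).2
      have h2 : (l.length : Int) = (p : Int) + 1 := by exact_mod_cast congrArg (Nat.cast (R := Int)) he.symm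
      omega
    | succ e ihe =>
      intro p hp he
      have hp1 : p + 1 < l.length := by omega
      have h1 := hget p (p + 1) hp hp1 (by omega)
      have h2 := ihe (p + 1) hp1 (by omega)
      push_cast at h2 ⊢
      omega
  intro p hp
  have h1 := lower p hp
  have h2 := upper (l.length - p - 1) p hp (by omega)
  omega

theorem counting_eq (L : List (Int × Int × Int)) (k : Int)
    (hkey : ∀ j, j < L.length → 0 ≤ keyAt L k j ∧ keyAt L k j < (L.length : Int)) :
    counting_sort L k = (idxSorted L k).map (fun j => L.getD j (0, 0, 0)) := by
  -- phase 1: the histogram loop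
  obtain ⟨h1l, h1v⟩ := hist_fold L k (PySem.List.pyRange 0 (L.length : Int) 1)
    (List.replicate L.length 0) (by simp)
    (fun j hj => PySem.List.mem_pyRange_one.mp hj) hkey
  have hc1 : ∀ v : Int, 0 ≤ v →
      PySem.List.pyGetD ((PySem.List.pyRange 0 (L.length : Int) 1).foldl (histStep L k)
        (List.replicate L.length 0)) v 0 = (cntEq L k v : Int) := by
    intro v hv
    rw [h1v v hv]
    have hrep : PySem.List.pyGetD (List.replicate L.length (0 : Int)) v 0 = 0 := by
      rw [PySem.List.pyGetD_of_nonneg _ _ hv]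
      rcases Nat.lt_or_ge v.toNat L.length with h | h
      · rw [List.getD_eq_getElem _ _ (by simpa using h)]
        simp
      · rw [List.getD_eq_default _ _ (by simpa using h)]
    have hcnt : (PySem.List.pyRange 0 (L.length : Int) 1).countP
        (fun j => decide (keyAt L k j.toNat = v)) = cntEq L k v := by
      rw [PySem.List.pyRange_zero_nat, List.countP_map]
      refine List.countP_congr (fun x _ => ?_)
      simp
    rw [hrep, hcnt]
    ring
  -- phase 2: the prefix-sum loop
  obtain ⟨h2l, h2v⟩ := pre_fold L k hkey _ h1l hc1 L.length le_rfl
  have hc2 : ∀ v : Int, 0 ≤ v →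
      PySem.List.pyGetD ((PySem.List.pyRange 1 (L.length : Int) 1).foldl preStep
          ((PySem.List.pyRange 0 (L.length : Int) 1).foldl (histStep L k)
            (List.replicate L.length 0))) v 0 =
        if v < (L.length : Int) then (cntLe L k v : Int) else 0 := by
    intro v hv
    rw [h2v v hv]
    by_cases hvn : v < (L.length : Int)
    · rw [if_pos hvn, if_pos hvn]
    · rw [if_neg hvn, if_neg hvn, cntEq_out L k hkey v (by omega)]
      rfl
  -- phase 3: the placement loop
  obtain ⟨⟨h3o, h3c⟩, h3cv, h3ov⟩ := place_fold L k hkey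
    (List.replicate L.length (0, 0, 0)) _ (by simp) h2l hc2 L.length 0 (by omega)
  rw [show ((0 : Nat) : Int) - 1 = -1 by norm_num] at h3o h3c h3cv h3ov
  -- the port's computation is exactly these three folds
  show ((PySem.List.pyRange ((L.length : Int) - 1) (-1) (-1)).foldl (placeStep L k)
      (List.replicate L.length (0, 0, 0),
        (PySem.List.pyRange 1 (L.length : Int) 1).foldl preStep
          ((PySem.List.pyRange 0 (L.length : Int) 1).foldl (histStep L k)
            (List.replicate L.length 0)))).1 = _
  -- the argsort list and the identity posOf (idxSorted[p]) = p
  have hjsl : (idxSorted L k).length = L.length := by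
    rw [idxSorted, PySem.List.length_sorted, List.length_range]
  have hjmem : ∀ x ∈ idxSorted L k, x < L.length := fun x hx =>
    List.mem_range.mp ((PySem.List.mem_sorted _ _ _ _).mp hx)
  have hnd : (idxSorted L k).Nodup :=
    ((PySem.List.sorted_perm _ _ _).nodup_iff).mpr List.nodup_range
  have hpw := PySem.List.sorted_pairwise (List.range L.length)
    (fun j => toLex (keyAt L k j, (j : Int)))
  have hstrict : ∀ p q (hp : p < (idxSorted L k).length) (hq : q < (idxSorted L k).length),
      p < q → posOf L k (idxSorted L k)[p] < posOf L k (idxSorted L k)[q] := by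
    intro p q hp hq hpq
    have hle := (List.pairwise_iff_getElem.mp hpw) p q hp hq hpq
    have hne : (idxSorted L k)[p] ≠ (idxSorted L k)[q] := fun h => by
      have := hnd.getElem_inj_iff.mp h
      omega
    have hlt : toLex (keyAt L k (idxSorted L k)[p], ((idxSorted L k)[p] : Int)) <
        toLex (keyAt L k (idxSorted L k)[q], ((idxSorted L k)[q] : Int)) := by
      refine lt_of_le_of_ne hle (fun hEq => hne ?_)
      have h2' : (((idxSorted L k)[p] : Int)) = (((idxSorted L k)[q] : Int)) :=
        congrArg Prod.snd (toLex_inj.mp hEq)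
      exact_mod_cast h2'
    rcases Prod.Lex.lt_iff.mp hlt with h | ⟨h1, h2⟩
    · exact posOf_lt_of_key_lt L k _ _ (hjmem _ ((idxSorted L k).getElem_mem hq)) h
    · have h2' : (((idxSorted L k)[p] : Int)) < (((idxSorted L k)[q] : Int)) := h2
      exact posOf_lt_of_eq L k _ _ (hjmem _ ((idxSorted L k).getElem_mem hp))
        (hjmem _ ((idxSorted L k).getElem_mem hq)) (by exact_mod_cast h2') h1
  have hg : ∀ p (hp : p < (idxSorted L k).length), posOf L k (idxSorted L k)[p] = (p : Int) := by
    have hid := incr_getElem ((idxSorted L k).map (fun j => posOf L k j))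
      (List.pairwise_iff_getElem.mpr (by
        intro i j hi hj hij
        simp only [List.getElem_map]
        exact hstrict i j (by simpa using hi) (by simpa using hj) hij))
      (by
        intro x hx
        obtain ⟨j, hjm, rfl⟩ := List.mem_map.mp hx
        obtain ⟨hb1, hb2⟩ := posOf_bounds L k hkey j (hjmem j hjm)
        refine ⟨hb1, ?_⟩
        rw [List.length_map, hjsl]
        exact hb2)
    intro p hp
    have := hid p (by simpa using hp)
    simpa using this
  -- final pointwise identification
  refine List.ext_getElem (by rw [h3o, List.length_map, hjsl]) (fun p h1p h2p => ?_)
  have hpjs : p < (idxSorted L k).length := by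
    rw [List.length_map] at h2p
    exact h2p
  have hjn := hjmem _ ((idxSorted L k).getElem_mem hpjs)
  have hplace := h3ov (idxSorted L k)[p] (Nat.zero_le _) hjn
  rw [hg p hpjs] at hplace
  rw [PySem.List.pyGetD_natCast, List.getD_eq_getElem _ _ (by rw [h3o]; exact hjsl ▸ hpjs)] at hplace
  rw [hplace]
  simp [List.getElem_map]

theorem map_getD_range (L : List (Int × Int × Int)) :
    (List.range L.length).map (fun j => L.getD j (0, 0, 0)) = L := by
  refine List.ext_getElem (by simp) (fun i h1 h2 => ?_)
  simp only [List.getElem_map, List.getElem_range]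
  exact List.getD_eq_getElem _ _ h2

theorem counting_perm (L : List (Int × Int × Int)) (k : Int)
    (hkey : ∀ j, j < L.length → 0 ≤ keyAt L k j ∧ keyAt L k j < (L.length : Int)) :
    (counting_sort L k).Perm L := by
  rw [counting_eq L k hkey]
  have hperm : (idxSorted L k).Perm (List.range L.length) := PySem.List.sorted_perm _ _ _
  have := hperm.map (fun j => L.getD j (0, 0, 0))
  rwa [map_getD_range] at this

theorem counting_pairwise (L : List (Int × Int × Int)) (k : Int)
    (σ : (Int × Int × Int) → (Int × Int × Int) → Prop)
    (hkey : ∀ j, j < L.length → 0 ≤ keyAt L k j ∧ keyAt L k j < (L.length : Int))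
    (hσ : L.Pairwise σ) :
    (counting_sort L k).Pairwise
      (fun a b => tget a k < tget b k ∨ (tget a k = tget b k ∧ σ a b)) := by
  rw [counting_eq L k hkey]
  have hjsl : (idxSorted L k).length = L.length := by
    rw [idxSorted, PySem.List.length_sorted, List.length_range]
  have hjmem : ∀ x ∈ idxSorted L k, x < L.length := fun x hx =>
    List.mem_range.mp ((PySem.List.mem_sorted _ _ _ _).mp hx)
  have hnd : (idxSorted L k).Nodup :=
    ((PySem.List.sorted_perm _ _ _).nodup_iff).mpr List.nodup_range
  have hpw := PySem.List.sorted_pairwise (List.range L.length)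
    (fun j => toLex (keyAt L k j, (j : Int)))
  have hσg := List.pairwise_iff_getElem.mp hσ
  refine List.pairwise_iff_getElem.mpr (fun p q h1p h1q hpq => ?_)
  rw [List.length_map] at h1p h1q
  simp only [List.getElem_map]
  have hle := (List.pairwise_iff_getElem.mp hpw) p q h1p h1q hpq
  have hne : (idxSorted L k)[p] ≠ (idxSorted L k)[q] := fun h => by
    have := hnd.getElem_inj_iff.mp h
    omega
  have hlt : toLex (keyAt L k (idxSorted L k)[p], ((idxSorted L k)[p] : Int)) <
      toLex (keyAt L k (idxSorted L k)[q], ((idxSorted L k)[q] : Int)) := by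
    refine lt_of_le_of_ne hle (fun hEq => hne ?_)
    have h2' : (((idxSorted L k)[p] : Int)) = (((idxSorted L k)[q] : Int)) :=
      congrArg Prod.snd (toLex_inj.mp hEq)
    exact_mod_cast h2'
  have hp' := hjmem _ ((idxSorted L k).getElem_mem h1p)
  have hq' := hjmem _ ((idxSorted L k).getElem_mem h1q)
  rcases Prod.Lex.lt_iff.mp hlt with h | ⟨h1, h2⟩
  · exact Or.inl h
  · refine Or.inr ⟨h1, ?_⟩
    have h2' : (((idxSorted L k)[p] : Int)) < (((idxSorted L k)[q] : Int)) := h2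
    have hlt2 : (idxSorted L k)[p] < (idxSorted L k)[q] := by exact_mod_cast h2'
    have := hσg _ _ hp' hq' hlt2
    rwa [List.getD_eq_getElem _ _ hp', List.getD_eq_getElem _ _ hq']

theorem tget_zero (t : Int × Int × Int) : tget t 0 = t.1 := by simp [tget]
theorem tget_one (t : Int × Int × Int) : tget t 1 = t.2.1 := by norm_num [tget]
theorem tget_two (t : Int × Int × Int) : tget t 2 = t.2.2 := by norm_num [tget]

theorem sorted_entries_eq (sequence : List (Int × Int))
    (hb : ∀ e ∈ sequence, 0 ≤ e.1 ∧ e.1 < sequence.length ∧ 0 ≤ e.2 ∧ e.2 < sequence.length) :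
    (radix_sort ((PySem.List.enumerate sequence).map (fun p => (p.2.1, p.2.2, p.1))) 3).map
        (fun t => ((t.1, t.2.1), t.2.2)) =
      PySem.List.sorted ((PySem.List.enumerate sequence).map (fun p => (p.2, p.1))) keyP false := by
  set L0 := (PySem.List.enumerate sequence).map (fun p => (p.2.1, p.2.2, p.1)) with hL0
  have hlen0 : L0.length = sequence.length := by
    rw [hL0, List.length_map, PySem.List.length_enumerate]
  have helem : ∀ t ∈ L0,
      (0 ≤ t.1 ∧ t.1 < (sequence.length : Int)) ∧
      (0 ≤ t.2.1 ∧ t.2.1 < (sequence.length : Int)) ∧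
      (0 ≤ t.2.2 ∧ t.2.2 < (sequence.length : Int)) := by
    intro t ht
    obtain ⟨p, hp, rfl⟩ := List.mem_map.mp ht
    obtain ⟨kk, hkk, rfl⟩ := (PySem.List.mem_enumerate_iff _ _ _).mp hp
    have hb' := hb _ (sequence.getElem_mem hkk)
    refine ⟨⟨by exact_mod_cast hb'.1, by exact_mod_cast hb'.2.1⟩,
      ⟨by exact_mod_cast hb'.2.2.1, by exact_mod_cast hb'.2.2.2⟩, ?_, ?_⟩
    · simp
    · simp only []
      push_cast
      omega
  -- round 1 (k = 2)
  have hkey2 : ∀ j, j < L0.length → 0 ≤ keyAt L0 2 j ∧ keyAt L0 2 j < (L0.length : Int) :=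
    keyAt_bounds L0 2 (fun t ht => by
      rw [tget_two, hlen0]
      exact (helem t ht).2.2)
  set L1 := counting_sort L0 2 with hL1
  have hperm1 : L1.Perm L0 := counting_perm L0 2 hkey2
  have hlen1 : L1.length = L0.length := hperm1.length_eq
  -- round 2 (k = 1)
  have hkey1 : ∀ j, j < L1.length → 0 ≤ keyAt L1 1 j ∧ keyAt L1 1 j < (L1.length : Int) :=
    keyAt_bounds L1 1 (fun t ht => by
      rw [tget_one, hlen1, hlen0]
      exact (helem t (hperm1.mem_iff.mp ht)).2.1)
  set L2 := counting_sort L1 1 with hL2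
  have hperm2 : L2.Perm L1 := counting_perm L1 1 hkey1
  have hlen2 : L2.length = L1.length := hperm2.length_eq
  -- round 3 (k = 0)
  have hkey0 : ∀ j, j < L2.length → 0 ≤ keyAt L2 0 j ∧ keyAt L2 0 j < (L2.length : Int) :=
    keyAt_bounds L2 0 (fun t ht => by
      rw [tget_zero, hlen2, hlen1, hlen0]
      exact (helem t (hperm1.mem_iff.mp (hperm2.mem_iff.mp ht))).1)
  set L3 := counting_sort L2 0 with hL3
  have hperm3 : L3.Perm L2 := counting_perm L2 0 hkey0
  -- pairwise chain
  have hP0 : L0.Pairwise (fun a b => a.2.2 < b.2.2) := by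
    rw [hL0, List.pairwise_map]
    simpa using PySem.List.pairwise_lt_enumerate sequence 0
  have hP1 : L1.Pairwise (fun a b => a.2.2 < b.2.2) := by
    refine (counting_pairwise L0 2 _ hkey2 hP0).imp ?_
    rintro a b (h | ⟨_, h2⟩)
    · rwa [tget_two, tget_two] at h
    · exact h2
  have hP2 : L2.Pairwise (fun a b => a.2.1 < b.2.1 ∨ (a.2.1 = b.2.1 ∧ a.2.2 < b.2.2)) := by
    refine (counting_pairwise L1 1 _ hkey1 hP1).imp ?_
    rintro a b (h | ⟨h1, h2⟩)
    · exact Or.inl (by rwa [tget_one, tget_one] at h)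
    · exact Or.inr ⟨by rwa [tget_one, tget_one] at h1, h2⟩
  have hP3 : L3.Pairwise (fun a b =>
      a.1 < b.1 ∨ (a.1 = b.1 ∧ (a.2.1 < b.2.1 ∨ (a.2.1 = b.2.1 ∧ a.2.2 < b.2.2)))) := by
    refine (counting_pairwise L2 0 _ hkey0 hP2).imp ?_
    rintro a b (h | ⟨h1, h2⟩)
    · exact Or.inl (by rwa [tget_zero, tget_zero] at h)
    · exact Or.inr ⟨by rwa [tget_zero, tget_zero] at h1, h2⟩
  -- the radix loop is the three rounds
  have hradix : radix_sort L0 3 = L3 := by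
    rw [radix_sort, show PySem.List.pyRange ((3 : Int) - 1) (-1) (-1) = [2, 1, 0] from by decide]
    rfl
  rw [hradix]
  -- identify with the library sort through uniqueness
  refine (PySem.List.sorted_eq_of_perm_of_pairwise_lt _ _ keyP ?_ ?_).symm
  · have hmap := (hperm3.trans (hperm2.trans hperm1)).map (fun t => ((t.1, t.2.1), t.2.2))
    have hcomp : L0.map (fun t => ((t.1, t.2.1), t.2.2)) =
        (PySem.List.enumerate sequence).map (fun p => (p.2, p.1)) := by
      rw [hL0, List.map_map]
      rfl
    rwa [hcomp] at hmap
  · refine List.pairwise_map.mpr (hP3.imp ?_)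
    intro a b h
    show toLex (toLex (a.1, a.2.1), a.2.2) < toLex (toLex (b.1, b.2.1), b.2.2)
    rcases h with h | ⟨h1, h2 | ⟨h3, h4⟩⟩
    · exact Prod.Lex.lt_iff.mpr (Or.inl (Prod.Lex.lt_iff.mpr (Or.inl h)))
    · exact Prod.Lex.lt_iff.mpr (Or.inl (Prod.Lex.lt_iff.mpr (Or.inr ⟨by simpa using h1, h2⟩)))
    · exact Prod.Lex.lt_iff.mpr (Or.inr ⟨by simp [h1, h3], h4⟩)

theorem pairs_eq_map_pyRange (sequence : List (Int × Int)) :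
    (PySem.List.enumerate sequence).map (fun p => (p.2, p.1)) =
      (PySem.List.pyRange 0 (sequence.length : Int) 1).map
        (fun i => (PySem.List.pyGetD sequence i (0, 0), i)) := by
  rw [PySem.List.enumerate_eq_map_pyRange sequence (0, 0), List.map_map]
  rfl

-- the two rename loops walk the same sorted order and keep the same dictionary and output list
theorem rename_sim :
    ∀ (S : List ((Int × Int) × Int))
      (lastE : Option ((Int × Int) × Int)) (idxA idxB : Int) (prevB : Option (Int × Int))
      (fe : PySem.Dict Int Int) (p2i : List (Option Int)),
      ((lastE = none ∧ prevB = none ∧ idxA = 0 ∧ idxB = -1) ∨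
        (∃ le, lastE = some le ∧ prevB = some le.1 ∧ idxA = idxB)) →
      (S.foldl renameStepA (lastE, idxA, fe, p2i)).2.2 =
      (S.foldl renameStepB (idxB, prevB, fe, p2i)).2.2 := by
  intro S
  induction S with
  | nil =>
    intro lastE idxA idxB prevB fe p2i hrel
    rfl
  | cons p t ih =>
    intro lastE idxA idxB prevB fe p2i hrel
    rw [List.foldl_cons, List.foldl_cons]
    rcases hrel with ⟨hA1, hB1, hA2, hB2⟩ | ⟨le, hA1, hB1, hA2⟩
    · subst hA1 hB1 hA2 hB2
      have hA : renameStepA (none, 0, fe, p2i) p =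
          (some p, 0, fe.insert 0 p.2, lset p2i p.2 (some 0)) := rfl
      have hB : renameStepB (-1, none, fe, p2i) p =
          (-1 + 1, some p.1, fe.insert (-1 + 1) p.2, lset p2i p.2 (some (-1 + 1))) := by
        unfold renameStepB
        rw [if_pos (by simp)]
      rw [hA, hB]
      rw [show (-1 + 1 : Int) = 0 by norm_num]
      exact ih (some p) 0 0 (some p.1) (fe.insert 0 p.2)
        (lset p2i p.2 (some 0)) (Or.inr ⟨p, rfl, rfl, rfl⟩)
    · subst hA1 hB1 hA2
      have hA : renameStepA (some le, idxA, fe, p2i) p =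
          if le.1 ≠ p.1 then
            (some p, idxA + 1, fe.insert (idxA + 1) p.2, lset p2i p.2 (some (idxA + 1)))
          else (some p, idxA, fe, lset p2i p.2 (some idxA)) := rfl
      have hB : renameStepB (idxA, some le.1, fe, p2i) p =
          if le.1 ≠ p.1 then
            (idxA + 1, some p.1, fe.insert (idxA + 1) p.2, lset p2i p.2 (some (idxA + 1)))
          else (idxA, some p.1, fe, lset p2i p.2 (some idxA)) := by
        unfold renameStepB
        by_cases hc : le.1 = p.1
        · rw [if_neg (by simp [hc]), if_neg (by simp [hc])]
        · rw [if_pos (by simp [hc]), if_pos hc]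
      rw [hA, hB]
      by_cases hc : le.1 = p.1
      · rw [if_neg (by simp [hc]), if_neg (by simp [hc])]
        exact ih (some p) idxA idxA (some p.1) fe
          (lset p2i p.2 (some idxA)) (Or.inr ⟨p, rfl, rfl, rfl⟩)
      · rw [if_pos hc, if_pos hc]
        exact ih (some p) (idxA + 1) (idxA + 1) (some p.1) (fe.insert (idxA + 1) p.2)
          (lset p2i p.2 (some (idxA + 1))) (Or.inr ⟨p, rfl, rfl, rfl⟩)

theorem sort_rename_entries (sequence : List (Int × Int)) (seq_of_chars : Bool)
    (hpre : Pre_sort_rename sequence seq_of_chars) :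
    sort_rename sequence seq_of_chars = sort_rename_alt sequence seq_of_chars := by
  have hsim := rename_sim
    (PySem.List.sorted ((PySem.List.pyRange 0 (sequence.length : Int) 1).map
      (fun i => (PySem.List.pyGetD sequence i (0, 0), i))) keyP false)
    none 0 (-1) none PySem.Dict.empty (List.replicate sequence.length none)
    (Or.inl ⟨rfl, rfl, rfl, rfl⟩)
  cases seq_of_chars with
  | true =>
    simp only [sort_rename, sort_rename_alt, if_true]
    rw [pairs_eq_map_pyRange sequence]
    exact Prod.ext (congrArg Prod.snd hsim) (congrArg (fun z => PySem.Dict.items z.1) hsim)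
  | false =>
    rcases hpre with h | hbnd
    · exact absurd h (by simp)
    simp only [sort_rename, sort_rename_alt, Bool.false_eq_true, if_false]
    rw [sorted_entries_eq sequence hbnd, pairs_eq_map_pyRange sequence]
    exact Prod.ext (congrArg Prod.snd hsim) (congrArg (fun z => PySem.Dict.items z.1) hsim)

-- ===== VERDICT (by name: the statement is the Claim_ definition above) =====
theorem sort_rename_spec : Claim_equal_sort_rename := by
  intro sequence seq_of_chars _hdom hpre
  unfold Spec_sort_rename
  exact sort_rename_entries sequence seq_of_chars hpre
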